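-- pv_equiv track=rewrite | github.com/AsphyxiaOVO/polynomial_commitment_secrete_sharing | message_coding.py | merge_polynomials_to_integer
-- ===== SOURCE A (Python) =====
-- def merge_polynomials_to_integer(polynomials: list[int],padding_zeros) -> int:
--     # 找到数组中最长的位数
--     max_digits = max(len(str(poly)) for poly in polynomials)
--
--     # 将每个多项式补0到最长的位数
--     padded_polynomials = [str(poly).zfill(max_digits) for poly in polynomials]
--
--     # 拼接所有多项式
--     number_str = ''.join(padded_polynomials)
--
--     # 去掉末尾的0（如果有补0）
--     if padding_zeros > 0 :
--         number_str = number_str[:-padding_zeros]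
--     else :
--         number_str=number_str
--
--     # 如果去掉末尾的0后字符串为空，说明原始数是0
--     if not number_str:
--         return 0
--
--     # 将字符串转换为整数
--     return int(number_str)
-- ===== SOURCE B (Python) =====
-- def merge_polynomials_to_integer(polynomials: list[int], padding_zeros) -> int:
--     # widest value determines the fixed block width (same ValueError on empty input as A)
--     max_digits = max(len(str(poly)) for poly in polynomials)
--
--     # emit each value's digits arithmetically, fixed-width, instead of str/zfill/join
--     chars = []
--     for poly in polynomials:
--         q = poly
--         block = []
--         for _ in range(max_digits):
--             block.append(chr(ord('0') + q % 10))
--             q //= 10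
--         block.reverse()
--         chars += block
--
--     if padding_zeros > 0:
--         chars = chars[:-padding_zeros]
--
--     if not chars:
--         return 0
--     return int(''.join(chars))
-- ===== Notes on version B (the rewrite author's own statement) =====
-- stated objective: alternative
-- what changed: B builds each value's fixed-width digit block arithmetically with % 10 and //= 10 in a nested loop and concatenates the digit characters, instead of A's str()/zfill()/join() string formatting; the trailing strip and int() conversion stay at the character level.
-- outside the precondition, e.g. on merge_polynomials_to_integer([-5, 1], 0): A returns -501, B returns 9501; on merge_polynomials_to_integer([-5], 0): A returns -5, B returns 95; on merge_polynomials_to_integer([], 0): A raises ValueError, B raises ValueError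
import Mathlib
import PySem

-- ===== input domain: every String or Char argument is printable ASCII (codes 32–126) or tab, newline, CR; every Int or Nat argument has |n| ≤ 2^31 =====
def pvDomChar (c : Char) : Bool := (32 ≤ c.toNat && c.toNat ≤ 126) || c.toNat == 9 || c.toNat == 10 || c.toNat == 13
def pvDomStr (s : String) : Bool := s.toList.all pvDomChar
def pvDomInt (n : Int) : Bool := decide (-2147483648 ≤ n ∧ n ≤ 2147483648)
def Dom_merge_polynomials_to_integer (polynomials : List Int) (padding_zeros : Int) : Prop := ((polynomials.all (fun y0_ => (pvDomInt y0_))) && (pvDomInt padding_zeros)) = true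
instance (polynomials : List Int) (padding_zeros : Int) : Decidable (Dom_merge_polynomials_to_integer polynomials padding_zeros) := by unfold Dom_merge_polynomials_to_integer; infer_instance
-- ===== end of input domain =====

-- B builds each value's fixed-width digit block arithmetically with % and // instead of
-- str/zfill/join string formatting (objective: alternative decomposition, same cost).

-- ===== PORT A =====
-- max(len(str(poly)) for poly in polynomials); .getD 0 is dead code: none = ValueError on [], excluded by Pre_
def merge_polynomials_to_integer (polynomials : List Int) (padding_zeros : Int) : Int :=
  let max_digits : Int :=
    (PySem.List.max? (polynomials.map (fun poly => PySem.Str.len (PySem.Int.toStr poly))) id).getD 0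
  let padded_polynomials : List String :=
    polynomials.map (fun poly => PySem.Str.zfill (PySem.Int.toStr poly) max_digits)
  let number_str : String := PySem.Str.join "" padded_polynomials
  let number_str : String :=
    if padding_zeros > 0 then PySem.Str.slice number_str none (some (-padding_zeros)) else number_str
  if PySem.Str.len number_str = 0 then 0
  else (PySem.Int.ofStr? number_str).getD 0  -- .getD 0 dead: int() = ValueError only outside Pre_

-- ===== PORT B =====
-- for _ in range(max_digits): block.append(chr(ord('0') + q % 10)); q //= 10
def pvBlock (q : Int) (m : Nat) (block : List Char) : List Char :=
  match m with
  | 0 => block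
  | m + 1 =>
      pvBlock (PySem.Int.floordiv q 10) m
        (block ++ [Char.ofNat ('0'.toNat + (PySem.Int.mod q 10).toNat)])

def merge_polynomials_to_integer_alt (polynomials : List Int) (padding_zeros : Int) : Int :=
  let max_digits : Int :=
    (PySem.List.max? (polynomials.map (fun poly => PySem.Str.len (PySem.Int.toStr poly))) id).getD 0
  let chars : List Char :=
    polynomials.foldl (fun acc poly => acc ++ (pvBlock poly max_digits.toNat []).reverse) []
  let chars : List Char :=
    if padding_zeros > 0 then PySem.List.slice chars none (some (-padding_zeros)) else chars
  if chars = [] then 0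
  else (PySem.Int.ofChars? chars).getD 0  -- int(''.join(chars)); .getD 0 dead under Pre_

-- ===== PRECONDITION & SPEC =====
-- Pre_ excludes the empty list, on which A raises ValueError (max of an empty sequence), and lists
-- with a negative value whose digit block is not certainly stripped away by padding_zeros: such
-- values lie outside the zero-padding scheme's domain — on most of them A raises ValueError (int()
-- meets a '-' in the middle of the concatenation), and where A does return, its sign-concatenation
-- value and B's digit-arithmetic value are both accidental. (11 = the widest str() of an int
-- admitted by Dom_, so 11*(len-i) ≤ padding_zeros guarantees positions i.. are stripped.)
def Pre_merge_polynomials_to_integer (polynomials : List Int) (padding_zeros : Int) : Prop :=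
  polynomials ≠ [] ∧ ∀ (i : Nat) (h : i < polynomials.length),
    0 ≤ polynomials[i] ∨ 11 * ((polynomials.length : Int) - (i : Int)) ≤ padding_zeros
instance (polynomials : List Int) (padding_zeros : Int) : Decidable (Pre_merge_polynomials_to_integer polynomials padding_zeros) := by unfold Pre_merge_polynomials_to_integer; infer_instance
def pvWitness_merge_polynomials_to_integer : List Int × Int := ([3, 12], 1)
def Spec_merge_polynomials_to_integer (polynomials : List Int) (padding_zeros : Int) (out : Int) : Prop := out = merge_polynomials_to_integer_alt polynomials padding_zeros
instance (polynomials : List Int) (padding_zeros : Int) (out : Int) : Decidable (Spec_merge_polynomials_to_integer polynomials padding_zeros out) := by unfold Spec_merge_polynomials_to_integer; infer_instance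

-- ===== CLAIM (what is proved, stated in full; the proofs are below) =====
def Claim_equal_merge_polynomials_to_integer : Prop := ∀ (polynomials : List Int) (padding_zeros : Int), Dom_merge_polynomials_to_integer polynomials padding_zeros → Pre_merge_polynomials_to_integer polynomials padding_zeros → Spec_merge_polynomials_to_integer polynomials padding_zeros (merge_polynomials_to_integer polynomials padding_zeros)

-- ===== LEMMAS AND PROOFS =====

-- little-endian decimal digit characters of n (at least one digit)
def pvDecRev (n : Nat) : List Char :=
  if h : n < 10 then [Nat.digitChar n]
  else Nat.digitChar (n % 10) :: pvDecRev (n / 10)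
decreasing_by exact Nat.div_lt_self (by omega) (by omega)

lemma pvDecRev_ne_nil (n : Nat) : pvDecRev n ≠ [] := by
  unfold pvDecRev; split <;> simp

lemma pvDecRev_mem_digit (n : Nat) : ∀ c ∈ pvDecRev n, ∃ d, d < 10 ∧ c = Nat.digitChar d := by
  induction n using Nat.strong_induction_on with
  | _ n ih =>
    unfold pvDecRev
    split
    · rename_i h; intro c hc; simp at hc; exact ⟨n, h, hc⟩
    · rename_i h
      intro c hc
      rcases List.mem_cons.mp hc with hc | hc
      · exact ⟨n % 10, Nat.mod_lt _ (by omega), hc⟩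
      · exact ih (n / 10) (Nat.div_lt_self (by omega) (by omega)) c hc

lemma pv_toDigitsCore_eq : ∀ (f n : Nat) (acc : List Char), 0 < f → n < 10 ^ f →
    Nat.toDigitsCore 10 f n acc = (pvDecRev n).reverse ++ acc := by
  intro f
  induction f with
  | zero => omega
  | succ f ih =>
    intro n acc _ hlt
    rw [Nat.toDigitsCore]
    by_cases h10 : n < 10
    · have : n / 10 = 0 := Nat.div_eq_of_lt h10
      rw [if_pos this]
      rw [pvDecRev, dif_pos h10]
      simp [Nat.mod_eq_of_lt h10]
    · have hdiv : n / 10 ≠ 0 := by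
        intro h; have := Nat.div_eq_of_lt (by omega : n < 10); omega
      rw [if_neg hdiv]
      have hfpos : 0 < f := by
        by_contra h
        have hf0 : f = 0 := by omega
        subst hf0; simp at hlt; omega
      have hlt' : n / 10 < 10 ^ f := by
        have : n < 10 ^ (f + 1) := hlt
        rw [pow_succ] at this
        exact Nat.div_lt_of_lt_mul (by omega)
      rw [ih (n / 10) _ hfpos hlt']
      conv_rhs => rw [pvDecRev]
      rw [dif_neg h10]
      simp

lemma pv_toDigits_eq (n : Nat) : Nat.toDigits 10 n = (pvDecRev n).reverse := by
  have h1 : n < 10 ^ (n + 1) :=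
    lt_of_lt_of_le (Nat.lt_pow_self (by norm_num)) (Nat.pow_le_pow_right (by norm_num) (by omega))
  simpa using pv_toDigitsCore_eq (n + 1) n [] (by omega) h1

lemma pv_toChars_nonneg (p : Int) (hp : 0 ≤ p) :
    PySem.Int.toChars p = (pvDecRev p.toNat).reverse := by
  rw [PySem.Int.toChars, if_neg (by omega), pv_toDigits_eq]

lemma pvBlock_zero (m : Nat) (block : List Char) :
    pvBlock 0 m block = block ++ List.replicate m '0' := by
  induction m generalizing block with
  | zero => simp [pvBlock]
  | succ m ih =>
    rw [pvBlock]
    have h1 : PySem.Int.floordiv 0 10 = 0 := by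
      rw [PySem.Int.floordiv_eq_ediv_of_pos (by norm_num)]; norm_num
    have h2 : PySem.Int.mod 0 10 = 0 := by
      rw [PySem.Int.mod_eq_emod_of_pos (by norm_num)]; norm_num
    have h3 : Char.ofNat ('0'.toNat + (0 : Int).toNat) = '0' := by decide
    rw [h1, h2, ih, h3]
    simp [List.replicate_succ]

lemma pv_digitChar_eq (d : Nat) (hd : d < 10) :
    Char.ofNat ('0'.toNat + d) = Nat.digitChar d := by
  interval_cases d <;> decide

lemma pvBlock_eq (m : Nat) : ∀ (q : Nat) (block : List Char),
    (pvDecRev q).length ≤ m →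
    pvBlock (q : Int) m block
      = block ++ (pvDecRev q ++ List.replicate (m - (pvDecRev q).length) '0') := by
  induction m with
  | zero =>
    intro q block hlen
    have := pvDecRev_ne_nil q
    have : (pvDecRev q).length ≠ 0 := by simpa [List.length_eq_zero_iff]
    omega
  | succ m ih =>
    intro q block hlen
    rw [pvBlock]
    have hdiv : PySem.Int.floordiv (q : Int) 10 = ((q / 10 : Nat) : Int) := by
      rw [show ((10 : Int)) = ((10 : Nat) : Int) by norm_num]
      exact PySem.Int.floordiv_natCast q 10
    have hmod : PySem.Int.mod (q : Int) 10 = ((q % 10 : Nat) : Int) := by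
      rw [show ((10 : Int)) = ((10 : Nat) : Int) by norm_num]
      exact PySem.Int.mod_natCast q 10
    have hmodlt : q % 10 < 10 := Nat.mod_lt _ (by omega)
    rw [hdiv, hmod]
    have hchar : Char.ofNat ('0'.toNat + ((q % 10 : Nat) : Int).toNat) = Nat.digitChar (q % 10) := by
      rw [Int.toNat_natCast]; exact pv_digitChar_eq _ hmodlt
    rw [hchar]
    by_cases h10 : q < 10
    · have hq10 : q / 10 = 0 := Nat.div_eq_of_lt h10
      rw [hq10]
      rw [show ((0 : Nat) : Int) = (0 : Int) by norm_num, pvBlock_zero]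
      rw [pvDecRev, dif_pos h10]
      simp [Nat.mod_eq_of_lt h10]
    · have hrec : pvDecRev q = Nat.digitChar (q % 10) :: pvDecRev (q / 10) := by
        rw [pvDecRev, dif_neg h10]
      have hlen' : (pvDecRev (q / 10)).length ≤ m := by
        rw [hrec] at hlen; simpa using Nat.le_of_succ_le_succ (by simpa using hlen)
      rw [ih (q / 10) _ hlen']
      rw [hrec]
      simp only [List.length_cons, List.append_assoc, List.cons_append, List.nil_append]
      have : m + 1 - ((pvDecRev (q / 10)).length + 1) = m - (pvDecRev (q / 10)).length := by omega
      rw [this]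

-- per element: zfill(str(p), M) as characters = the reversed arithmetic digit block of B
lemma pv_block_zfill (p : Int) (hp : 0 ≤ p) (M : Int)
    (hle : PySem.Str.len (PySem.Int.toStr p) ≤ M) :
    (PySem.Str.zfill (PySem.Int.toStr p) M).toList = (pvBlock p M.toNat []).reverse := by
  have htl : (PySem.Int.toStr p).toList = (pvDecRev p.toNat).reverse := by
    rw [PySem.Int.toList_toStr, pv_toChars_nonneg p hp]
  have hlen : (pvDecRev p.toNat).length ≤ M.toNat := by
    have : PySem.Str.len (PySem.Int.toStr p) = ((PySem.Int.toStr p).toList.length : Int) := rfl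
    rw [this, htl] at hle
    simp at hle
    omega
  have hq : p = ((p.toNat : Nat) : Int) := by omega
  rw [PySem.Str.toList_zfill, htl]
  conv_rhs => rw [hq]
  rw [pvBlock_eq M.toNat p.toNat [] hlen]
  simp only [List.nil_append, List.reverse_append, List.reverse_replicate]
  -- LHS: zfill of a pure digit string
  rw [PySem.Chars.zfill.eq_def]
  rcases hrev : (pvDecRev p.toNat).reverse with _ | ⟨c, rest⟩
  · exfalso
    have := pvDecRev_ne_nil p.toNat
    simp at hrev
    exact this hrev
  · have hcdigit : ∃ d, d < 10 ∧ c = Nat.digitChar d := by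
      apply pvDecRev_mem_digit p.toNat
      have : c ∈ (pvDecRev p.toNat).reverse := by rw [hrev]; simp
      simpa using this
    have hnosign : ¬(c = '+' ∨ c = '-') := by
      rcases hcdigit with ⟨d, hd, rfl⟩
      interval_cases d <;> decide
    by_cases hM : M ≤ ((c :: rest).length : Int)
    · rw [if_pos hM]
      have : M.toNat - (pvDecRev p.toNat).length = 0 := by
        have : (c :: rest).length = (pvDecRev p.toNat).length := by
          rw [← hrev]; simp
        omega
      rw [this]
      simp
    · rw [if_neg hM]
      change (if c = '+' ∨ c = '-' then c :: (List.replicate (M.toNat - (c :: rest).length) '0' ++ rest)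
        else List.replicate (M.toNat - (c :: rest).length) '0' ++ c :: rest) = _
      rw [if_neg hnosign]
      have : (c :: rest).length = (pvDecRev p.toNat).length := by
        rw [← hrev]; simp
      rw [this]

lemma pv_join_nil_flatten (parts : List (List Char)) :
    PySem.Chars.join [] parts = parts.flatten := by
  induction parts with
  | nil => rfl
  | cons x xs ih =>
    cases xs with
    | nil => simp [PySem.Chars.join, List.intercalate]
    | cons y ys =>
      have := ih
      simp [PySem.Chars.join, List.intercalate] at this ⊢
      simpa using this

-- max? over a nonempty list returns some element that bounds the list
lemma pv_max?_isSome {α κ : Type} [LinearOrder κ] (xs : List α) (key : α → κ) (hne : xs ≠ []) :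
    ∃ m, PySem.List.max? xs key = some m ∧ m ∈ xs := by
  have haux : ∀ (l : List α) (a : α),
      ∃ m, (List.foldl (fun acc x => match acc with
              | none => some x
              | some mm => if key mm < key x then some x else some mm) (some a) l) = some m
            ∧ (m = a ∨ m ∈ l) := by
    intro l
    induction l with
    | nil => intro a; exact ⟨a, rfl, Or.inl rfl⟩
    | cons x xs ih =>
      intro a
      simp only [List.foldl_cons]
      by_cases h : key a < key x
      · rw [if_pos h]
        rcases ih x with ⟨m, hm, hmem⟩
        exact ⟨m, hm, by rcases hmem with h | h <;> simp [h]⟩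
      · rw [if_neg h]
        rcases ih a with ⟨m, hm, hmem⟩
        exact ⟨m, hm, by rcases hmem with h | h <;> simp [h]⟩
  cases xs with
  | nil => exact absurd rfl hne
  | cons a l =>
    rcases haux l a with ⟨m, hm, hmem⟩
    refine ⟨m, ?_, ?_⟩
    · rw [PySem.List.max?]; simpa using hm
    · rcases hmem with h | h <;> simp [h]

-- every digit block of B has exactly m characters
lemma pvBlock_length (m : Nat) : ∀ (q : Int) (block : List Char),
    (pvBlock q m block).length = block.length + m := by
  induction m with
  | zero => intro q block; simp [pvBlock]
  | succ m ih =>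
    intro q block
    rw [pvBlock, ih]
    simp
    omega

lemma pv_toStr_len_pos (p : Int) : 1 ≤ (PySem.Int.toStr p).toList.length := by
  rw [PySem.Int.toList_toStr, PySem.Int.toChars]
  split
  · simp
  · rw [pv_toDigits_eq]
    have := pvDecRev_ne_nil p.toNat
    have : (pvDecRev p.toNat).length ≠ 0 := by simpa [List.length_eq_zero_iff]
    simp
    omega

-- within Dom_ (|p| ≤ 2^31) str(p) has at most 11 characters
lemma pv_toStr_len_le (p : Int) (h : -2147483648 ≤ p ∧ p ≤ 2147483648) :
    (PySem.Int.toStr p).toList.length ≤ 11 := by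
  have hd : ∀ n : Nat, n ≤ 2147483648 → (Nat.toDigits 10 n).length ≤ 10 := by
    intro n hn
    exact Nat.toDigits_length 10 n 10 (by norm_num) (by omega)
  rw [PySem.Int.toList_toStr, PySem.Int.toChars]
  split
  · have : p.natAbs ≤ 2147483648 := by omega
    have := hd p.natAbs this
    simp
    omega
  · have : p.toNat ≤ 2147483648 := by omega
    have := hd p.toNat this
    omega

-- length of the flattened character sequences: one m-wide block per element
lemma pv_lenB (polynomials : List Int) (m : Nat) :
    ((polynomials.map (fun p => (pvBlock p m []).reverse)).flatten).length
      = polynomials.length * m := by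
  induction polynomials with
  | nil => simp
  | cons x xs ih =>
    simp only [List.map_cons, List.flatten_cons, List.length_append, ih, List.length_reverse]
    rw [pvBlock_length]
    simp [List.length_cons]
    ring

lemma pv_lenA (polynomials : List Int) (M : Int)
    (hm : ∀ p ∈ polynomials, PySem.Str.len (PySem.Int.toStr p) ≤ M) :
    ((polynomials.map (fun p => (PySem.Str.zfill (PySem.Int.toStr p) M).toList)).flatten).length
      = polynomials.length * M.toNat := by
  induction polynomials with
  | nil => simp
  | cons x xs ih =>
    have hx := hm x (by simp)
    have hxs : ∀ p ∈ xs, PySem.Str.len (PySem.Int.toStr p) ≤ M := fun p hp => hm p (by simp [hp])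
    have hlen : (PySem.Int.toStr x).toList.length ≤ M.toNat := by
      have h1 : PySem.Str.len (PySem.Int.toStr x) = ((PySem.Int.toStr x).toList.length : Int) := rfl
      have h2 := pv_toStr_len_pos x
      rw [h1] at hx
      omega
    simp only [List.map_cons, List.flatten_cons, List.length_append, ih hxs]
    rw [PySem.Str.toList_zfill, PySem.Chars.length_zfill]
    simp only [String.length_toList] at hlen ⊢
    rw [Nat.max_eq_right hlen]
    simp [List.length_cons]
    ring

-- the two character sequences agree on any prefix inside the leading nonnegative blocks
lemma pv_take_eq (polynomials : List Int) (M : Int)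
    (hm : ∀ p ∈ polynomials, PySem.Str.len (PySem.Int.toStr p) ≤ M) (j : Nat)
    (hj : j ≤ (polynomials.takeWhile (fun p => decide (0 ≤ p))).length * M.toNat) :
    (((polynomials.map (fun p => (PySem.Str.zfill (PySem.Int.toStr p) M).toList)).flatten).take j)
      = (((polynomials.map (fun p => (pvBlock p M.toNat []).reverse)).flatten).take j) := by
  set tw := polynomials.takeWhile (fun p => decide (0 ≤ p)) with htw
  set rest := polynomials.dropWhile (fun p => decide (0 ≤ p)) with hrest
  have hsplit : tw ++ rest = polynomials := List.takeWhile_append_dropWhile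
  have hmemtw : ∀ p ∈ tw, p ∈ polynomials := by
    intro p hp; rw [← hsplit]; exact List.mem_append_left _ hp
  have hAB : tw.map (fun p => (PySem.Str.zfill (PySem.Int.toStr p) M).toList)
      = tw.map (fun p => (pvBlock p M.toNat []).reverse) := by
    apply List.map_congr_left
    intro p hp
    have hpos : 0 ≤ p := by
      have := List.mem_takeWhile_imp hp
      simpa using this
    exact pv_block_zfill p hpos M (hm p (hmemtw p hp))
  have hlen : ((tw.map (fun p => (pvBlock p M.toNat []).reverse)).flatten).length
      = tw.length * M.toNat := pv_lenB tw M.toNat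
  conv_lhs => rw [← hsplit]
  conv_rhs => rw [← hsplit]
  rw [List.map_append, List.map_append, List.flatten_append, List.flatten_append, hAB]
  rw [List.take_append_of_le_length (by rw [hlen]; exact hj),
      List.take_append_of_le_length (by rw [hlen]; exact hj)]

-- ===== VERDICT (by name: the statement is the Claim_ definition above) =====
theorem merge_polynomials_to_integer_spec : Claim_equal_merge_polynomials_to_integer := by
  intro polynomials padding_zeros hdom hpre
  rcases hpre with ⟨hne, hpre⟩
  have hdom' : ∀ p ∈ polynomials, -2147483648 ≤ p ∧ p ≤ 2147483648 := by
    unfold Dom_merge_polynomials_to_integer at hdom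
    simp [List.all_eq_true, pvDomInt] at hdom
    intro p hp
    exact (hdom.1 p hp)
  unfold Spec_merge_polynomials_to_integer
  unfold merge_polynomials_to_integer merge_polynomials_to_integer_alt
  set M : Int := (PySem.List.max? (polynomials.map (fun poly => PySem.Str.len (PySem.Int.toStr poly))) id).getD 0 with hM
  -- M bounds every element's str length, and M ≤ 11 within Dom_
  obtain ⟨Mv, hMv, hMvmem⟩ := pv_max?_isSome
      (polynomials.map (fun poly => PySem.Str.len (PySem.Int.toStr poly))) id (by simpa using hne)
  have hMeq : M = Mv := by rw [hM, hMv]; rfl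
  have hmax : ∀ p ∈ polynomials, PySem.Str.len (PySem.Int.toStr p) ≤ M := by
    intro p hp
    have := PySem.List.max?_isMax hMv (PySem.Str.len (PySem.Int.toStr p))
      (by simp only [List.mem_map]; exact ⟨p, hp, rfl⟩)
    rw [hMeq]; simpa using this
  have hM11 : M ≤ 11 := by
    rw [hMeq]
    simp only [List.mem_map] at hMvmem
    obtain ⟨p, hp, hpe⟩ := hMvmem
    have h1 : PySem.Str.len (PySem.Int.toStr p) = ((PySem.Int.toStr p).toList.length : Int) := rfl
    have := pv_toStr_len_le p (hdom' p hp)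
    rw [← hpe, h1]
    omega
  have hM1 : 1 ≤ M := by
    rcases List.exists_mem_of_ne_nil polynomials hne with ⟨p0, hp0⟩
    have h1 : PySem.Str.len (PySem.Int.toStr p0) = ((PySem.Int.toStr p0).toList.length : Int) := rfl
    have h2 := pv_toStr_len_pos p0
    have := hmax p0 hp0
    rw [h1] at this
    omega
  -- the two full character sequences as flattened block lists
  set fA : Int → List Char := fun p => (PySem.Str.zfill (PySem.Int.toStr p) M).toList with hfA
  set fB : Int → List Char := fun p => (pvBlock p M.toNat []).reverse with hfB
  set ns : String := PySem.Str.join "" (polynomials.map (fun poly => PySem.Str.zfill (PySem.Int.toStr poly) M)) with hns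
  set cb : List Char := polynomials.foldl (fun acc poly => acc ++ (pvBlock poly M.toNat []).reverse) [] with hcb
  have hnsl : ns.toList = (polynomials.map fA).flatten := by
    rw [hns, PySem.Str.toList_join]
    have hsep : ("" : String).toList = ([] : List Char) := rfl
    rw [hsep, pv_join_nil_flatten, List.map_map]
    rfl
  have hcbl : cb = (polynomials.map fB).flatten := by
    rw [hcb, PySem.List.foldl_append_eq_flatMap fB polynomials []]
    simp [List.flatMap]
  have hlA : ns.toList.length = polynomials.length * M.toNat := by
    rw [hnsl]; exact pv_lenA polynomials M hmax
  have hlB : cb.length = polynomials.length * M.toNat := by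
    rw [hcbl]; exact pv_lenB polynomials M.toNat
  -- takeWhile bookkeeping for the truncation argument
  set tw := polynomials.takeWhile (fun p => decide (0 ≤ p)) with htwdef
  have htws : tw ++ polynomials.dropWhile (fun p => decide (0 ≤ p)) = polynomials :=
    List.takeWhile_append_dropWhile
  have htwlen : tw.length ≤ polynomials.length := by
    conv_rhs => rw [← htws]
    simp
  have hneg_bound : tw.length < polynomials.length →
      11 * ((polynomials.length : Int) - (tw.length : Int)) ≤ padding_zeros := by
    intro hlt
    have hdw : ∀ (l : List Int) (r : Int) (t : List Int),
        List.dropWhile (fun p => decide (0 ≤ p)) l = r :: t → ¬ 0 ≤ r := by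
      intro l
      induction l with
      | nil => intro r t h; simp [List.dropWhile] at h
      | cons x xs ih =>
        intro r t h
        rw [List.dropWhile_cons] at h
        split at h
        · exact ih r t h
        · rename_i hx
          obtain ⟨rfl, rfl⟩ := List.cons.inj h
          simpa using hx
    rcases hrest : polynomials.dropWhile (fun p => decide (0 ≤ p)) with _ | ⟨r, t⟩
    · rw [hrest] at htws; simp at htws; rw [htws] at hlt; omega
    · have hrneg : ¬ 0 ≤ r := hdw polynomials r t hrest
      have hpoly : polynomials = tw ++ r :: t := by rw [← htws, hrest]
      have hidx : polynomials[tw.length]'hlt = r := by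
        have hge := List.getElem_of_eq hpoly hlt
        rw [hge, List.getElem_append_right (Nat.le_refl _)]
        simp
      rcases hpre tw.length hlt with h | h
      · rw [hidx] at h; exact absurd h hrneg
      · exact h
  -- the (possibly sliced) character sequences agree
  have hslice : (if padding_zeros > 0 then PySem.Str.slice ns none (some (-padding_zeros)) else ns).toList
      = (if padding_zeros > 0 then PySem.List.slice cb none (some (-padding_zeros)) else cb) := by
    split
    · rename_i hpz
      have hk : padding_zeros = (padding_zeros.toNat : Int) := by omega
      have hkpos : 0 < padding_zeros.toNat := by omega
      have e1 : (PySem.Str.slice ns none (some (-padding_zeros))).toList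
          = PySem.List.slice ns.toList none (some (-padding_zeros)) := by
        simp [PySem.Str.slice]
      rw [e1, hk, PySem.List.slice_to_neg_natCast ns.toList padding_zeros.toNat hkpos,
          PySem.List.slice_to_neg_natCast cb padding_zeros.toNat hkpos]
      rw [hlA, hlB, hnsl, hcbl]
      apply pv_take_eq polynomials M hmax
      -- the surviving prefix lies inside the leading nonnegative blocks
      show polynomials.length * M.toNat - padding_zeros.toNat ≤ tw.length * M.toNat
      by_cases hcase : tw.length < polynomials.length
      · have hb := hneg_bound hcase
        have hm11 : M.toNat ≤ 11 := by omega
        have h1 : M.toNat * (polynomials.length - tw.length) ≤ 11 * (polynomials.length - tw.length) :=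
          Nat.mul_le_mul_right _ hm11
        have h2 : 11 * (polynomials.length - tw.length) ≤ padding_zeros.toNat := by omega
        have e : polynomials.length * M.toNat
            = tw.length * M.toNat + M.toNat * (polynomials.length - tw.length) := by
          rw [Nat.mul_comm M.toNat (polynomials.length - tw.length), ← Nat.add_mul]
          congr 1
          omega
        omega
      · have hteq : tw.length = polynomials.length := by omega
        rw [hteq]
        omega
    · -- padding_zeros ≤ 0: Pre_ forces every element nonnegative, full equality
      rename_i hpz
      have hall : tw.length = polynomials.length := by
        by_contra h
        have hlt : tw.length < polynomials.length := by omega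
        have := hneg_bound hlt
        have : (0 : Int) < 11 * ((polynomials.length : Int) - (tw.length : Int)) := by
          have : (tw.length : Int) < (polynomials.length : Int) := by exact_mod_cast hlt
          omega
        omega
      have := pv_take_eq polynomials M hmax (polynomials.length * M.toNat)
        (by rw [hall])
      rw [hnsl, hcbl]
      calc (polynomials.map fA).flatten
          = ((polynomials.map fA).flatten).take (polynomials.length * M.toNat) := by
            rw [List.take_of_length_le]
            rw [← hnsl, hlA]
        _ = ((polynomials.map fB).flatten).take (polynomials.length * M.toNat) := this
        _ = (polynomials.map fB).flatten := by
            rw [List.take_of_length_le]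
            rw [← hcbl, hlB]
  set ns' := if padding_zeros > 0 then PySem.Str.slice ns none (some (-padding_zeros)) else ns
  set cb' := if padding_zeros > 0 then PySem.List.slice cb none (some (-padding_zeros)) else cb
  have hlen : PySem.Str.len ns' = (ns'.toList.length : Int) := rfl
  have hof : PySem.Int.ofStr? ns' = PySem.Int.ofChars? ns'.toList := rfl
  show (if PySem.Str.len ns' = 0 then (0 : Int) else (PySem.Int.ofStr? ns').getD 0)
      = (if cb' = [] then (0 : Int) else (PySem.Int.ofChars? cb').getD 0)
  rw [hlen, hof, hslice]
  by_cases hz : cb' = []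
  · simp [hz]
  · rw [if_neg (by simpa [List.length_eq_zero_iff] using hz), if_neg hz]
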